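-- pv_equiv track=rewrite | github.com/lunamystry/scripts | volume_notify.py | bar
-- ===== SOURCE A (Python) =====
-- def bar(volume):
--     """ Calculates how long the length of the volume bar is to be"""
--     barstr = ''
--     steps = 3
--     for x in range(0, volume, steps):
--         barstr = barstr+'|'
--     for x in range(volume, 100, steps):
--         barstr = barstr+'-'
--     return barstr
-- ===== SOURCE B (Python) =====
-- def bar(volume):
--     """ Calculates how long the length of the volume bar is to be"""
--     n_fill = max(0, -(-volume // 3))
--     n_empty = max(0, -(-(100 - volume) // 3))
--     return '|' * n_fill + '-' * n_empty
-- ===== Notes on version B (the rewrite author's own statement) =====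
-- stated objective: faster
-- what changed: Replaced the two char-by-char append loops with closed-form ceiling-division counts of each range and string multiplication.
import Mathlib
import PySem

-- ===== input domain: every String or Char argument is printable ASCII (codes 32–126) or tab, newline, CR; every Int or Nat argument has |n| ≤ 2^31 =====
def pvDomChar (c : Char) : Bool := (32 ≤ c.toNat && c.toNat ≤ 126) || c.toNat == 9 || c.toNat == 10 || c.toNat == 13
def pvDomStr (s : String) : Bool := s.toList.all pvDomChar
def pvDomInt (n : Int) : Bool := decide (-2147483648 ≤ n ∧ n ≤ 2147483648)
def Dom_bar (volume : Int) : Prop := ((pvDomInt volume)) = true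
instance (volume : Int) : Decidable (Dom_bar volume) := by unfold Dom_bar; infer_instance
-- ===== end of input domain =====

-- B replaces the two per-step append loops with closed-form ceiling-division counts and string repetition.


-- ===== PORT A =====
-- Literal port of A: two foldl loops over range(0, volume, 3) and range(volume, 100, 3),
-- each appending one char per element.
def bar (volume : Int) : String :=
  let barstr : String := ""
  let steps : Int := 3
  let barstr := (PySem.List.pyRange 0 volume steps).foldl (fun acc _ => acc ++ "|") barstr
  let barstr := (PySem.List.pyRange volume 100 steps).foldl (fun acc _ => acc ++ "-") barstr
  barstr

-- ===== PORT B =====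
-- B: closed-form segment lengths (ceiling divisions) and string multiplication; faster (no per-step loop for the counts).
def bar_alt (volume : Int) : String :=
  let nFill : Int := max 0 (-(PySem.Int.floordiv (-volume) 3))
  let nEmpty : Int := max 0 (-(PySem.Int.floordiv (-(100 - volume)) 3))
  String.ofList (List.replicate nFill.toNat '|') ++ String.ofList (List.replicate nEmpty.toNat '-')

-- ===== PRECONDITION & SPEC =====
def Spec_bar (volume : Int) (out : String) : Prop := out = bar_alt volume
instance (volume : Int) (out : String) : Decidable (Spec_bar volume out) := by unfold Spec_bar; infer_instance

-- ===== CLAIM (what is proved, stated in full; the proofs are below) =====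
def Claim_equal_bar : Prop := ∀ (volume : Int), Dom_bar volume → Spec_bar volume (bar volume)

-- ===== LEMMAS AND PROOFS =====

-- each loop iteration appends one fixed char, so the loop appends length-many copies
theorem foldl_append_char (c : Char) (l : List Int) (s : String) :
    l.foldl (fun acc _ => acc ++ String.ofList [c]) s = s ++ String.ofList (List.replicate l.length c) := by
  induction l generalizing s with
  | nil => exact String.append_empty.symm
  | cons x xs ih =>
      simp only [List.foldl_cons, ih, List.length_cons, List.replicate_succ]
      rw [String.append_assoc, ← String.ofList_append]
      rfl

theorem foldl_fill (l : List Int) (s : String) :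
    l.foldl (fun acc _ => acc ++ "|") s = s ++ String.ofList (List.replicate l.length '|') := by
  have h : ("|" : String) = String.ofList ['|'] := rfl
  rw [h]; exact foldl_append_char '|' l s

theorem foldl_empty (l : List Int) (s : String) :
    l.foldl (fun acc _ => acc ++ "-") s = s ++ String.ofList (List.replicate l.length '-') := by
  have h : ("-" : String) = String.ofList ['-'] := rfl
  rw [h]; exact foldl_append_char '-' l s

theorem length_pyRange_pos (a b : Int) :
    (PySem.List.pyRange a b 3).length = (if a < b then ((b - a + 2) / 3).toNat else 0) := by
  rw [PySem.List.pyRange_of_pos a b (by norm_num : (0:Int) < 3)]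
  simp
  split_ifs <;> omega

theorem count_fill (v : Int) :
    (max 0 (-(PySem.Int.floordiv (-v) 3))).toNat = (if 0 < v then ((v - 0 + 2) / 3).toNat else 0) := by
  simp only [PySem.Int.floordiv, Int.fdiv_eq_ediv]
  split_ifs <;> omega

theorem count_empty (v : Int) :
    (max 0 (-(PySem.Int.floordiv (-(100 - v)) 3))).toNat = (if v < 100 then ((100 - v + 2) / 3).toNat else 0) := by
  simp only [PySem.Int.floordiv, Int.fdiv_eq_ediv]
  split_ifs <;> omega

-- ===== VERDICT (by name: the statement is the Claim_ definition above) =====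
theorem bar_spec : Claim_equal_bar := by
  intro v _
  show bar v = bar_alt v
  simp only [bar, bar_alt]
  rw [foldl_fill, foldl_empty, String.append_assoc, length_pyRange_pos 0 v,
      length_pyRange_pos v 100, ← count_fill v, ← count_empty v, ← String.append_assoc]
  rfl
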